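-- pv_equiv track=rewrite | github.com/pypi-data/pypi-mirror-14 | packages/PyGreSQL/PyGreSQL-4.2.2.tar.gz/PyGreSQL-4.2.2/pg.py | _split_parts
-- ===== SOURCE A (Python) =====
-- def _is_unquoted(s):
--     """Check whether this string is an unquoted identifier."""
--     s = s.replace('_', 'a')
--     return s.isalnum() and not s[:1].isdigit()
--
-- def _split_first_part(s):
--     """Split the first part of a dot separated string."""
--     s = s.lstrip()
--     if s[:1] == '"':
--         p = []
--         s = s.split('"', 3)[1:]
--         p.append(s[0])
--         while len(s) == 3 and s[1] == '':
--             p.append('"')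
--             s = s[2].split('"', 2)
--             p.append(s[0])
--         p = [''.join(p)]
--         s = '"'.join(s[1:]).lstrip()
--         if s:
--             if s[:0] == '.':
--                 p.append(s[1:])
--             else:
--                 s = _split_first_part(s)
--                 p[0] += s[0]
--                 if len(s) > 1:
--                     p.append(s[1])
--     else:
--         p = s.split('.', 1)
--         s = p[0].rstrip()
--         if _is_unquoted(s):
--             s = s.lower()
--         p[0] = s
--     return p
--
-- def _split_parts(s):
--     """Split all parts of a dot separated string."""
--     q = []
--     while s:
--         s = _split_first_part(s)
--         q.append(s[0])
--         if len(s) < 2: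
--             break
--         s = s[1]
--     return q
-- ===== SOURCE B (Python) =====
-- def _is_unquoted(s):
--     """Check whether this string is an unquoted identifier."""
--     s = s.replace('_', 'a')
--     return s.isalnum() and not s[:1].isdigit()
--
-- def _split_parts(s):
--     """Split all parts of a dot separated string (single linear scan)."""
--     parts = []
--     i, n = 0, len(s)
--     while i < n:
--         buf = []
--         more = False
--         scanning = True
--         while scanning:
--             while i < n and s[i].isspace():
--                 i += 1
--             if i < n and s[i] == '"':
--                 i += 1
--                 while i < n:
--                     c = s[i]
--                     i += 1
--                     if c == '"':
--                         if i < n and s[i] == '"':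
--                             buf.append('"')
--                             i += 1
--                         else:
--                             break
--                     else:
--                         buf.append(c)
--                 # loop back: scan the next fragment of this part
--             else:
--                 frag = []
--                 while i < n and s[i] != '.':
--                     frag.append(s[i])
--                     i += 1
--                 if i < n:  # hit a '.'
--                     more = True
--                     i += 1
--                 frag = ''.join(frag).rstrip()
--                 if _is_unquoted(frag):
--                     frag = frag.lower()
--                 buf.append(frag)
--                 scanning = False
--         parts.append(''.join(buf))
--         if not more:
--             break
--     return parts
-- ===== Notes on version B (the rewrite author's own statement) =====
-- stated objective: simpler
-- what changed: Replaced the recursive first-part splitter built on repeated str.split and str.join calls by a single left-to-right character scanner that keeps a part buffer and handles whitespace, quote openings, doubled quotes and dot separators directly.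
import Mathlib
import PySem

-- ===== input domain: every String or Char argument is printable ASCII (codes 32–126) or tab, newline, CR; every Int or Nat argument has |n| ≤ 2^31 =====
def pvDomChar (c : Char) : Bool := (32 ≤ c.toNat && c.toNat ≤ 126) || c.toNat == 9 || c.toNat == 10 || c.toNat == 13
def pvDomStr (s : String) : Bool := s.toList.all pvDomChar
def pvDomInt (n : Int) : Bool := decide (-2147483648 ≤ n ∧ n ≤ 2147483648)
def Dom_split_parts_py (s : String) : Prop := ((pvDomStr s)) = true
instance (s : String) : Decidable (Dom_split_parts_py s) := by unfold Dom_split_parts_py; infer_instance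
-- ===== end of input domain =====

-- B replaces A's recursive splitter built on repeated str.split and str.join calls by a
-- single left-to-right character scanner (objective: simpler, one pass over the characters).

-- ===== PORT A =====
-- literal transliteration of Source A at the List Char level; the Python while loops / recursion
-- become fueled recursions (the fuel only makes them total; with the fuels passed it never runs out).

-- _is_unquoted (module-level helper; Source A and Source B share this same function)
def isUnquotedPy (s : List Char) : Bool :=
  let t := PySem.Chars.replace s ['_'] ['a']
  PySem.Chars.strIsalnum t && !(PySem.Chars.strIsdigit (PySem.List.slice t none (some 1)))

-- the `while len(s) == 3 and s[1] == '':` loop of _split_first_part (state: p, s3)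
def firstLoopA : Nat → List (List Char) → List (List Char) → List (List Char) × List (List Char)
  | 0, p, s3 => (p, s3)
  | f + 1, p, s3 =>
    if s3.length = 3 ∧ s3.getD 1 [] = [] then
      let s3' := PySem.Chars.splitOnMax (s3.getD 2 []) ['"'] 2
      firstLoopA f (p ++ [['"']] ++ [s3'.headD []]) s3'
    else (p, s3)

-- _split_first_part
def firstA : Nat → List Char → List (List Char)
  | 0, _ => []
  | f + 1, s0 =>
    let s := PySem.Chars.lstrip s0
    if PySem.List.slice s none (some 1) = ['"'] then
      let sp := (PySem.Chars.splitOnMax s ['"'] 3).drop 1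
      let pr := firstLoopA f [sp.headD []] sp
      let pj : List Char := PySem.Chars.join [] pr.1
      let s' := PySem.Chars.lstrip (PySem.Chars.join ['"'] (pr.2.drop 1))
      if s' ≠ [] then
        if PySem.List.slice s' none (some 0) = ['.'] then
          [pj, PySem.List.slice s' (some 1) none]
        else
          let r := firstA f s'
          [pj ++ r.headD []] ++ (if 1 < r.length then [r.getD 1 []] else [])
      else [pj]
    else
      let p := PySem.Chars.splitOnMax s ['.'] 1
      let s1 := PySem.Chars.rstrip (p.headD [])
      let s2 := if isUnquotedPy s1 then PySem.Chars.lower s1 else s1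
      [s2] ++ p.drop 1

-- _split_parts (the outer while loop)
def partsA : Nat → List Char → List (List Char)
  | 0, _ => []
  | f + 1, s =>
    if s = [] then []
    else
      let r := firstA (s.length + 1) s
      [r.headD []] ++ (if 1 < r.length then partsA f (r.getD 1 []) else [])

def split_parts_py (s : String) : List String :=
  (partsA (s.toList.length + 1) s.toList).map String.mk

-- ===== PORT B =====
-- literal transliteration of Source B (single character scan); loops again as fueled recursions.

-- the inner `while i < n:` quote loop: returns (chars appended to buf, rest after the closing quote)
def scanQ : List Char → List Char × List Char
  | [] => ([], [])
  | c :: t =>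
    if c = '"' then
      if t.head? = some '"' then
        let pr := scanQ t.tail
        ('"' :: pr.1, pr.2)
      else ([], t)
    else
      let pr := scanQ t
      (c :: pr.1, pr.2)
  termination_by s => s.length
  decreasing_by
  · simpa using Nat.lt_succ_of_le (List.length_tail_le t)
  · simp

-- rstrip/lowercase applied to a finished unquoted fragment
def procFragB (frag : List Char) : List Char :=
  let f := PySem.Chars.rstrip frag
  if isUnquotedPy f then PySem.Chars.lower f else f

-- the `while scanning:` fragment loop of one part (state: buf); returns (part, rest after '.' if any)
def fragsB : Nat → List Char → List Char → List Char × Option (List Char)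
  | 0, _, buf => (buf, none)
  | f + 1, s, buf =>
    let s1 := s.dropWhile PySem.Chars.isspace
    if s1.head? = some '"' then
      let pr := scanQ s1.tail
      fragsB f pr.2 (buf ++ pr.1)
    else
      let frag := s1.takeWhile (· ≠ '.')
      let rest := s1.dropWhile (· ≠ '.')
      (buf ++ procFragB frag, if rest = [] then none else some rest.tail)

-- the outer `while i < n:` loop
def partsB : Nat → List Char → List (List Char)
  | 0, _ => []
  | f + 1, s =>
    if s = [] then []
    else
      let pr := fragsB (s.length + 1) s []
      pr.1 :: (match pr.2 with
        | some r => partsB f r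
        | none => [])

def split_parts_py_alt (s : String) : List String :=
  (partsB (s.toList.length + 1) s.toList).map String.mk

-- ===== PRECONDITION & SPEC =====
def Spec_split_parts_py (s : String) (out : List String) : Prop := out = split_parts_py_alt s
instance (s : String) (out : List String) : Decidable (Spec_split_parts_py s out) := by unfold Spec_split_parts_py; infer_instance

-- ===== CLAIM (what is proved, stated in full; the proofs are below) =====
def Claim_equal_split_parts_py : Prop := ∀ (s : String), Dom_split_parts_py s → Spec_split_parts_py s (split_parts_py s)

-- ===== LEMMAS AND PROOFS =====

-- reference model of Python's s.split(sep, maxsplit) for a one-character separator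
def mapHd (f : List Char → List Char) : List (List Char) → List (List Char)
  | [] => []
  | h :: t => f h :: t

def splitc (c : Char) : List Char → Nat → List (List Char)
  | s, 0 => [s]
  | [], _ + 1 => [[]]
  | a :: t, m + 1 =>
    if a = c then [] :: splitc c t m else mapHd (a :: ·) (splitc c t (m + 1))

theorem splitc_ne_nil (c : Char) (s : List Char) (m : Nat) : splitc c s m ≠ [] := by
  induction s generalizing m with
  | nil => cases m <;> simp [splitc]
  | cons a t ih =>
    cases m with
    | zero => simp [splitc]
    | succ m =>
      simp only [splitc]
      split
      · simp
      · rcases h : splitc c t (m + 1) with _ | ⟨h0, tl⟩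
        · exact absurd h (ih (m + 1))
        · simp [mapHd]

theorem mapHd_id' (l : List (List Char)) : mapHd (fun h => h) l = l := by
  cases l <;> simp [mapHd]

theorem go_spec (c : Char) :
    ∀ fuel (s : List Char), s.length < fuel → ∀ (m : Nat) (cur : List Char) (acc : List (List Char)),
      PySem.Chars.splitOnMax.go [c] fuel m s cur acc
        = acc.reverse ++ mapHd (fun h => cur.reverse ++ h) (splitc c s m) := by
  intro fuel
  induction fuel with
  | zero => intro s hs; omega
  | succ f ih =>
    intro s hs m cur acc
    cases s with
    | nil =>
      cases m <;> simp [PySem.Chars.splitOnMax.go, splitc, mapHd]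
    | cons a t =>
      cases m with
      | zero =>
        simp [PySem.Chars.splitOnMax.go, splitc, mapHd]
      | succ m =>
        by_cases hac : a = c
        · subst hac
          have hpre : [a].isPrefixOf (a :: t) = true := by simp [List.isPrefixOf]
          simp only [PySem.Chars.splitOnMax.go, Nat.succ_ne_zero, if_false, hpre, if_true,
            List.length_cons, List.length_nil, Nat.zero_add, Nat.add_sub_cancel,
            List.drop_succ_cons, List.drop_zero]
          rw [ih t (by simpa using Nat.lt_of_succ_lt_succ hs) m [] (cur.reverse :: acc)]
          rcases h : splitc a t m with _ | ⟨h0, tl⟩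
          · exact absurd h (splitc_ne_nil a t m)
          · simp [splitc, mapHd, h]
        · have hpre : [c].isPrefixOf (a :: t) = false := by
            simp [List.isPrefixOf, Ne.symm hac]
          simp only [PySem.Chars.splitOnMax.go, Nat.succ_ne_zero, if_false, hpre]
          rw [ih t (by simpa using Nat.lt_of_succ_lt_succ hs) (m + 1) (a :: cur) acc]
          rcases h : splitc c t (m + 1) with _ | ⟨h0, tl⟩
          · exact absurd h (splitc_ne_nil c t (m + 1))
          · simp [splitc, hac, mapHd, h]

theorem splitOnMax_eq (c : Char) (s : List Char) (m : Nat) :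
    PySem.Chars.splitOnMax s [c] (m : Int) = splitc c s m := by
  have h0 : ¬ ((m : Int) < 0) := by omega
  simp only [PySem.Chars.splitOnMax, h0, if_false]
  rw [go_spec c (s.length + 1) s (Nat.lt_succ_self _) (m : Int).toNat [] []]
  simp [mapHd_id']

theorem splitc_no_sep {c : Char} {s : List Char} (h : c ∉ s) (m : Nat) : splitc c s m = [s] := by
  induction s generalizing m with
  | nil => cases m <;> simp [splitc]
  | cons a t ih =>
    cases m with
    | zero => simp [splitc]
    | succ m =>
      simp only [List.mem_cons, not_or] at h
      simp [splitc, Ne.symm (h.1), ih h.2, mapHd]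

theorem splitc_sep_split {c : Char} {a : List Char} (h : c ∉ a) (u : List Char) (m : Nat) :
    splitc c (a ++ c :: u) (m + 1) = a :: splitc c u m := by
  induction a with
  | nil => simp [splitc]
  | cons x xs ih =>
    simp only [List.mem_cons, not_or] at h
    simp only [List.cons_append, splitc, if_neg (Ne.symm h.1), ih h.2, mapHd]

-- scanQ facts
theorem scanQ_no_quote {t : List Char} (h : '"' ∉ t) : scanQ t = (t, []) := by
  induction t with
  | nil => simp [scanQ]
  | cons a u ih =>
    simp only [List.mem_cons, not_or] at h
    simp [scanQ, Ne.symm h.1, ih h.2]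

theorem scanQ_prefix {a : List Char} (h : '"' ∉ a) (t : List Char) :
    scanQ (a ++ t) = (a ++ (scanQ t).1, (scanQ t).2) := by
  induction a with
  | nil => simp
  | cons x xs ih =>
    simp only [List.mem_cons, not_or] at h
    simp [scanQ, Ne.symm h.1, ih h.2]

theorem scanQ_rest_le_aux : ∀ (n : Nat) (t : List Char), t.length ≤ n → (scanQ t).2.length ≤ t.length := by
  intro n
  induction n with
  | zero =>
    intro t ht
    cases t with
    | nil => simp [scanQ]
    | cons c u => simp at ht
  | succ n ih =>
    intro t ht
    cases t with
    | nil => simp [scanQ]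
    | cons c u =>
      by_cases hc : c = '"'
      · by_cases hh : u.head? = some '"'
        · have h1 : u.tail.length ≤ n := by
            have := List.length_tail (l := u)
            simp at ht; omega
          have := ih u.tail h1
          have h2 : u.tail.length ≤ u.length := by have := List.length_tail (l := u); omega
          simp only [scanQ, if_pos hc, if_pos hh]
          simp only [List.length_cons]
          omega
        · simp [scanQ, hc, hh]
      · have h1 : u.length ≤ n := by simp at ht; omega
        have := ih u h1
        simp only [scanQ, if_neg hc, List.length_cons]
        omega

theorem scanQ_rest_le (t : List Char) : (scanQ t).2.length ≤ t.length :=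
  scanQ_rest_le_aux t.length t le_rfl

-- list utilities
-- join facts
theorem join_nil_flatten (l : List (List Char)) : PySem.Chars.join [] l = l.flatten := by
  induction l with
  | nil => simp [PySem.Chars.join_nil]
  | cons x r ih =>
    cases r with
    | nil => simp [PySem.Chars.join_singleton]
    | cons y rr => simp [PySem.Chars.join_cons_cons, ih]

theorem join_nil_append (p : List (List Char)) (x : List Char) :
    PySem.Chars.join [] (p ++ [x]) = PySem.Chars.join [] p ++ x := by
  simp [join_nil_flatten]

theorem scanQ_open_nodbl {u : List Char} (h : u.head? ≠ some '"') : scanQ ('"' :: u) = ([], u) := by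
  simp [scanQ, h]

theorem scanQ_dbl (v : List Char) : scanQ ('"' :: '"' :: v) = ('"' :: (scanQ v).1, (scanQ v).2) := by
  simp [scanQ]

theorem head?_ne_quote {u : List Char} (h : '"' ∉ u) : u.head? ≠ some '"' := by
  cases u with
  | nil => simp
  | cons x w =>
    simp only [List.mem_cons, not_or] at h
    simp [Ne.symm h.1]

-- decompose a list at its first occurrence of c
theorem first_char_split (c : Char) (t : List Char) :
    c ∉ t ∨ ∃ a u, t = a ++ c :: u ∧ c ∉ a := by
  induction t with
  | nil => left; simp
  | cons x w ih =>
    by_cases hx : x = c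
    · right; exact ⟨[], w, by simp [hx], by simp⟩
    · rcases ih with h | ⟨a, u, rfl, ha⟩
      · left; simp [Ne.symm hx, h]
      · right
        exact ⟨x :: a, u, rfl, by simp [Ne.symm hx]; exact ha⟩

-- the A-side quote loop computes exactly what B's scanQ computes
theorem loopA_spec :
    ∀ (fuel : Nat) (t : List Char), t.length < fuel → ∀ (p0 : List (List Char)),
      PySem.Chars.join [] (firstLoopA fuel (p0 ++ [(splitc '"' t 2).headD []]) (splitc '"' t 2)).1
          = PySem.Chars.join [] p0 ++ (scanQ t).1
      ∧ PySem.Chars.join ['"'] ((firstLoopA fuel (p0 ++ [(splitc '"' t 2).headD []]) (splitc '"' t 2)).2.drop 1)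
          = (scanQ t).2 := by
  intro fuel
  induction fuel with
  | zero => intro t ht; omega
  | succ f ih =>
    intro t ht p0
    rcases first_char_split '"' t with hqt | ⟨a, u, rfl, hqa⟩
    · -- no quote anywhere in t
      have hsp : splitc '"' t 2 = [t] := splitc_no_sep hqt 2
      rw [hsp]
      have hstop : firstLoopA (f + 1) (p0 ++ [List.headD [t] []]) [t] = (p0 ++ [t], [t]) := by
        simp [firstLoopA]
      rw [hstop, scanQ_no_quote hqt]
      refine ⟨?_, ?_⟩
      · rw [join_nil_append]
      · simp [PySem.Chars.join_nil]
    · -- t = a ++ '"' :: u with '"' ∉ a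
      have hsp : splitc '"' (a ++ '"' :: u) 2 = a :: splitc '"' u 1 :=
        splitc_sep_split hqa u 1
      rcases first_char_split '"' u with hqu | ⟨b, v, rfl, hqb⟩
      · -- no second quote: u is quote-free
        have hspu : splitc '"' u 1 = [u] := splitc_no_sep hqu 1
        rw [hsp, hspu]
        have hstop :
            firstLoopA (f + 1) (p0 ++ [List.headD (a :: [u]) []]) (a :: [u])
            = (p0 ++ [a], [a, u]) := by
          simp [firstLoopA]
        rw [hstop]
        have hscan : scanQ (a ++ '"' :: u) = (a, u) := by
          rw [scanQ_prefix hqa, scanQ_open_nodbl (head?_ne_quote hqu)]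
          simp
        rw [hscan]
        refine ⟨?_, ?_⟩
        · rw [join_nil_append]
        · simp [PySem.Chars.join_singleton]
      · by_cases hb : b = []
        · -- doubled quote: u = '"' :: v
          subst hb
          have hspu : splitc '"' ([] ++ '"' :: v) 1 = [[], v] := by
            simp [splitc]
          rw [hsp, hspu]
          have hlen : v.length < f := by
            have h1 : (a ++ '"' :: ([] ++ '"' :: v)).length = a.length + 2 + v.length := by
              simp; omega
            omega
          have hiter :
              firstLoopA (f + 1) (p0 ++ [List.headD (a :: [[], v]) []]) (a :: [[], v])
              = firstLoopA f
                  ((p0 ++ [a] ++ [['"']]) ++ [(splitc '"' v 2).headD []])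
                  (splitc '"' v 2) := by
            have h2 : PySem.Chars.splitOnMax v ['"'] 2 = splitc '"' v 2 := by
              have h3 := splitOnMax_eq '"' v 2
              norm_num at h3 ⊢
              exact h3
            simp only [firstLoopA]
            rw [if_pos (by simp)]
            simp [h2, List.append_assoc]
          rw [hiter]
          obtain ⟨ih1, ih2⟩ := ih v hlen (p0 ++ [a] ++ [['"']])
          have hscan : scanQ (a ++ '"' :: ([] ++ '"' :: v))
              = (a ++ '"' :: (scanQ v).1, (scanQ v).2) := by
            rw [List.nil_append, scanQ_prefix hqa, scanQ_dbl]
          rw [hscan]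
          refine ⟨?_, ?_⟩
          · rw [ih1, join_nil_append, join_nil_append]
            simp
          · exact ih2
        · -- a later quote, not doubled: u = b ++ '"' :: v with b ≠ []
          have hspu : splitc '"' (b ++ '"' :: v) 1 = b :: [v] := by
            have h4 := splitc_sep_split hqb v 0
            simpa [splitc] using h4
          rw [hsp, hspu]
          have hstop :
              firstLoopA (f + 1) (p0 ++ [List.headD (a :: b :: [v]) []]) (a :: b :: [v])
              = (p0 ++ [a], [a, b, v]) := by
            simp only [firstLoopA]
            rw [if_neg (by simp [hb])]
            simp
          rw [hstop]
          have hscan : scanQ (a ++ '"' :: (b ++ '"' :: v)) = (a, b ++ '"' :: v) := by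
            have hh : (b ++ '"' :: v).head? ≠ some '"' := by
              rcases b with _ | ⟨x, w⟩
              · exact absurd rfl hb
              · simp only [List.mem_cons, not_or] at hqb
                simp [Ne.symm hqb.1]
            rw [scanQ_prefix hqa, scanQ_open_nodbl hh]
            simp
          rw [hscan]
          refine ⟨?_, ?_⟩
          · rw [join_nil_append]
          · simp [PySem.Chars.join_cons_cons, PySem.Chars.join_singleton]

theorem lstrip_idem (s : List Char) : PySem.Chars.lstrip (PySem.Chars.lstrip s) = PySem.Chars.lstrip s := by
  simp [PySem.Chars.lstrip, List.dropWhile_idempotent]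

theorem firstA_lstrip (f : Nat) (s : List Char) :
    firstA (f + 1) (PySem.Chars.lstrip s) = firstA (f + 1) s := by
  simp only [firstA, lstrip_idem]

theorem takedrop_no {c : Char} {a : List Char} (h : c ∉ a) (u : List Char) :
    (a ++ c :: u).takeWhile (fun x => decide (x ≠ c)) = a
    ∧ (a ++ c :: u).dropWhile (fun x => decide (x ≠ c)) = c :: u := by
  induction a with
  | nil => simp
  | cons x w ih =>
    simp only [List.mem_cons, not_or] at h
    have h2 := ih h.2
    simp only [ne_eq, decide_not] at h2 ⊢
    simp [Ne.symm h.1, h2.1, h2.2]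

theorem takedrop_all {c : Char} {l : List Char} (h : c ∉ l) :
    l.takeWhile (fun x => decide (x ≠ c)) = l ∧ l.dropWhile (fun x => decide (x ≠ c)) = [] := by
  induction l with
  | nil => simp
  | cons x w ih =>
    simp only [List.mem_cons, not_or] at h
    have h2 := ih h.2
    simp only [ne_eq, decide_not] at h2 ⊢
    simp [Ne.symm h.1, h2.1, h2.2]

theorem getD1_of_getElem? {r : List (List Char)} {rr : List Char} (h : r[1]? = some rr) :
    r.getD 1 [] = rr := by
  simp [List.getD, h]

-- one part: A's _split_first_part against B's fragment loop
theorem fragsB_spec :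
    ∀ (fA : Nat) (s : List Char), s.length < fA → ∀ (gB : Nat), s.length < gB → ∀ (buf : List Char),
      fragsB gB s buf = (buf ++ (firstA fA s).headD [], (firstA fA s)[1]?) := by
  intro fA
  induction fA with
  | zero => intro s hs; omega
  | succ f ih =>
    intro s hs gB hg buf
    rcases gB with _ | g
    · omega
    rcases hs1 : s.dropWhile PySem.Chars.isspace with _ | ⟨c, t⟩
    · -- nothing left after the whitespace: empty unquoted fragment, part ends
      have hl : PySem.Chars.lstrip s = [] := hs1
      have h1 : PySem.Chars.splitOnMax ([] : List Char) ['.'] 1 = [[]] := by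
        have h2 := splitOnMax_eq '.' [] 1
        norm_num at h2 ⊢
        simpa [splitc] using h2
      simp [firstA, fragsB, hl, hs1, h1, procFragB, PySem.List.slice,
        PySem.Chars.rstrip]
    · by_cases hc : c = '"'
      · -- a quoted fragment
        subst hc
        have hl : PySem.Chars.lstrip s = '"' :: t := hs1
        have hts : t.length + 1 ≤ s.length := by
          have h2 : (s.dropWhile PySem.Chars.isspace).length ≤ s.length := List.length_dropWhile_le _ _
          rw [hs1] at h2
          simpa using h2
        have hlen_t : t.length < f := by omega
        have h3 : PySem.Chars.splitOnMax ('"' :: t) ['"'] 3 = [] :: splitc '"' t 2 := by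
          have h4 := splitOnMax_eq '"' ('"' :: t) 3
          norm_num at h4 ⊢
          simpa [splitc] using h4
        obtain ⟨hl1, hl2⟩ := loopA_spec f t hlen_t []
        simp only [List.nil_append, PySem.Chars.join_nil] at hl1 hl2
        have hA : firstA (f + 1) s =
            (if PySem.Chars.lstrip ((scanQ t).2) ≠ [] then
              if PySem.List.slice (PySem.Chars.lstrip ((scanQ t).2)) none (some 0) = ['.'] then
                [(scanQ t).1, PySem.List.slice (PySem.Chars.lstrip ((scanQ t).2)) (some 1) none]
              else
                [(scanQ t).1 ++ (firstA f (PySem.Chars.lstrip ((scanQ t).2))).headD []] ++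
                  (if 1 < (firstA f (PySem.Chars.lstrip ((scanQ t).2))).length then
                    [(firstA f (PySem.Chars.lstrip ((scanQ t).2))).getD 1 []] else [])
            else [(scanQ t).1]) := by
          simp only [firstA, hl]
          rw [if_pos (show PySem.List.slice ('"' :: t) none (some 1) = ['"'] by
            simp [PySem.List.slice])]
          rw [h3]
          simp only [List.drop_succ_cons, List.drop_zero]
          rw [hl1, hl2]
        have hBstep : fragsB (g + 1) s buf = fragsB g ((scanQ t).2) (buf ++ (scanQ t).1) := by
          simp [fragsB, hs1]
        rw [hBstep, hA]
        by_cases hse : PySem.Chars.lstrip ((scanQ t).2) = []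
        · -- rest after the closing quote is only whitespace: part ends
          rw [if_neg (by simp [hse])]
          rcases g with _ | g'
          · omega
          have hse' : (scanQ t).2.dropWhile PySem.Chars.isspace = [] := hse
          have hpf : procFragB [] = [] := by decide
          simp [fragsB, hse', hpf]
        · rw [if_pos hse]
          rw [if_neg (by simp [PySem.List.slice])]
          have hr2 : (scanQ t).2.length ≤ t.length := scanQ_rest_le t
          have hB := ih ((scanQ t).2) (by omega) g (by omega) (buf ++ (scanQ t).1)
          rw [hB]
          rcases f with _ | f'
          · omega
          rw [show firstA (f' + 1) ((scanQ t).2)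
                = firstA (f' + 1) (PySem.Chars.lstrip ((scanQ t).2)) from
              (firstA_lstrip f' ((scanQ t).2)).symm]
          set r := firstA (f' + 1) (PySem.Chars.lstrip ((scanQ t).2)) with hrdef
          by_cases hrl : 1 < r.length
          · rcases h1? : r[1]? with _ | rr
            · rw [List.getElem?_eq_none_iff] at h1?
              omega
            rw [if_pos hrl]
            simp [h1?]
          · rw [if_neg hrl]
            have hnone : r[1]? = none := by
              rw [List.getElem?_eq_none_iff]
              omega
            simp [hnone]
      · -- an unquoted fragment: runs to the next '.' (or the end)
        have hl : PySem.Chars.lstrip s = c :: t := hs1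
        have hAc : ¬ (PySem.List.slice (c :: t) none (some 1) = ['"']) := by
          simp [PySem.List.slice, hc]
        have hBc : ¬ ((c :: t).head? = some '"') := by simp [hc]
        rcases first_char_split '.' (c :: t) with hnd | ⟨a, u, heq, hna⟩
        · obtain ⟨htw, hdw⟩ := takedrop_all hnd
          have h1 : PySem.Chars.splitOnMax (c :: t) ['.'] 1 = [c :: t] := by
            have h2 := splitOnMax_eq '.' (c :: t) 1
            norm_num at h2 ⊢
            rw [h2]
            exact splitc_no_sep hnd 1
          simp only [firstA, fragsB, hl, hs1]
          rw [if_neg hAc, if_neg hBc, h1, htw, hdw]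
          simp [procFragB]
        · obtain ⟨htw, hdw⟩ := takedrop_no hna u
          have h1 : PySem.Chars.splitOnMax (c :: t) ['.'] 1 = [a, u] := by
            have h2 := splitOnMax_eq '.' (c :: t) 1
            norm_num at h2 ⊢
            rw [h2, heq]
            have h5 := splitc_sep_split hna u 0
            simpa [splitc] using h5
          simp only [firstA, fragsB, hl, hs1]
          rw [if_neg hAc, if_neg hBc, h1]
          rw [show (c :: t).takeWhile (fun x => decide (x ≠ '.')) = a from heq ▸ htw,
              show (c :: t).dropWhile (fun x => decide (x ≠ '.')) = '.' :: u from heq ▸ hdw]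
          simp [procFragB]

theorem fragsB_rest_lt :
    ∀ (g : Nat) (s : List Char) (buf b : List Char) (r : List Char),
      fragsB g s buf = (b, some r) → r.length < s.length := by
  intro g
  induction g with
  | zero => intro s buf b r h; simp [fragsB] at h
  | succ g ih =>
    intro s buf b r h
    have hlen1 : (s.dropWhile PySem.Chars.isspace).length ≤ s.length :=
      List.length_dropWhile_le _ _
    simp only [fragsB] at h
    by_cases hq : (s.dropWhile PySem.Chars.isspace).head? = some '"'
    · rw [if_pos hq] at h
      have h2 := ih _ _ _ _ h
      have h3 := scanQ_rest_le (s.dropWhile PySem.Chars.isspace).tail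
      have h4 : (s.dropWhile PySem.Chars.isspace).tail.length
          = (s.dropWhile PySem.Chars.isspace).length - 1 := List.length_tail
      rcases hnil : s.dropWhile PySem.Chars.isspace with _ | ⟨x, w⟩
      · rw [hnil] at hq; simp at hq
      · rw [hnil] at h2 h3 h4
        have h10 := congrArg List.length hnil
        simp only [List.length_cons] at h10
        simp only [List.tail_cons] at h2 h3
        omega
    · rw [if_neg hq] at h
      have h5 := congrArg Prod.snd h
      simp only at h5
      by_cases hr : (s.dropWhile PySem.Chars.isspace).dropWhile (fun x => decide (x ≠ '.')) = []
      · rw [if_pos hr] at h5; cases h5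
      · rw [if_neg hr] at h5
        have h6 : r = ((s.dropWhile PySem.Chars.isspace).dropWhile (fun x => decide (x ≠ '.'))).tail := by
          cases h5; rfl
        have h7 : ((s.dropWhile PySem.Chars.isspace).dropWhile (fun x => decide (x ≠ '.'))).length
            ≤ (s.dropWhile PySem.Chars.isspace).length := List.length_dropWhile_le _ _
        have h8 := List.length_tail
          (l := (s.dropWhile PySem.Chars.isspace).dropWhile (fun x => decide (x ≠ '.')))
        have h9 : ((s.dropWhile PySem.Chars.isspace).dropWhile (fun x => decide (x ≠ '.'))).length ≠ 0 := by
          simpa [List.length_eq_zero_iff] using hr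
        rw [h6]
        omega

-- the outer loops
theorem parts_eq :
    ∀ (f : Nat) (s : List Char), s.length < f → ∀ (g : Nat), s.length < g →
      partsA f s = partsB g s := by
  intro f
  induction f with
  | zero => intro s hs; omega
  | succ f ih =>
    intro s hs g hg
    rcases g with _ | g
    · omega
    by_cases hnil : s = []
    · simp [partsA, partsB, hnil]
    simp only [partsA, partsB, if_neg hnil]
    have hfr := fragsB_spec (s.length + 1) s (Nat.lt_succ_self _) (s.length + 1)
      (Nat.lt_succ_self _) []
    rw [hfr]
    rcases h1 : (firstA (s.length + 1) s)[1]? with _ | rr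
    · have hn : ¬ 1 < (firstA (s.length + 1) s).length := by
        rw [List.getElem?_eq_none_iff] at h1
        omega
      simp [hn]
    · have hlen : 1 < (firstA (s.length + 1) s).length := by
        by_contra hcon
        rw [List.getElem?_eq_none_iff.mpr (by omega)] at h1
        cases h1
      have hrlt : rr.length < s.length := by
        apply fragsB_rest_lt (s.length + 1) s [] _ rr
        rw [hfr, h1]
      rw [if_pos hlen, getD1_of_getElem? h1]
      rw [ih rr (by omega) g (by omega)]
      simp

-- ===== VERDICT (by name: the statement is the Claim_ definition above) =====
theorem split_parts_py_spec : Claim_equal_split_parts_py := by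
  intro s _
  unfold Spec_split_parts_py split_parts_py split_parts_py_alt
  rw [parts_eq (s.toList.length + 1) s.toList (Nat.lt_succ_self _) (s.toList.length + 1) (Nat.lt_succ_self _)]
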